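-- pv_equiv track=rewrite | github.com/ji-huazhong/TransferQueue | transfer_queue/utils/tensor_utils.py | merge_contiguous_memory
-- ===== SOURCE A (Python) =====
-- def merge_contiguous_memory(ptrs: list[int], sizes: list[int]) -> tuple[list[int], list[int]]:
--     """Merge contiguous memory regions to reduce register_buffer overhead
--
--     Args:
--         ptrs: List of memory pointers (starting addresses).
--         sizes: List of memory region sizes corresponding to each pointer.
--
--     Returns:
--         A tuple of (merged_ptrs, merged_sizes) where contiguous regions
--         have been merged into single regions.
--
--     Example:
--         >>> merge_contiguous_memory([0, 10, 30], [10, 20, 10])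
--         ([0, 30], [30, 10])
--
--         >>> merge_contiguous_memory([0, 5, 20], [5, 5, 10])
--         ([0, 20], [10, 10])
--     """
--     if len(ptrs) != len(sizes):
--         raise ValueError("ptrs and sizes must have the same length")
--
--     if not ptrs:
--         return [], []
--
--     # Create list of (ptr, size) pairs and sort by pointer address
--     regions = sorted(zip(ptrs, sizes, strict=False), key=lambda x: x[0])
--
--     merged_ptrs = []
--     merged_sizes = []
--
--     # Initialize with the first region
--     current_ptr, current_size = regions[0]
--
--     for ptr, size in regions[1:]:
--         # Check if current region is contiguous with the next one
--         # A region is contiguous if: ptr == current_ptr + current_size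
--         if ptr == current_ptr + current_size:
--             # Merge: extend the current region
--             current_size += size
--         else:
--             # Not contiguous: save the current region and start a new one
--             merged_ptrs.append(current_ptr)
--             merged_sizes.append(current_size)
--             current_ptr, current_size = ptr, size
--
--     # Add the last region
--     merged_ptrs.append(current_ptr)
--     merged_sizes.append(current_size)
--
--     return merged_ptrs, merged_sizes
-- ===== SOURCE B (Python) =====
-- def merge_contiguous_memory(ptrs: list[int], sizes: list[int]) -> tuple[list[int], list[int]]:
--     """Partition-then-reduce rewrite: split sorted regions into maximal
--     contiguous runs, then emit each run's start pointer and total size."""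
--     if len(ptrs) != len(sizes):
--         raise ValueError("ptrs and sizes must have the same length")
--     if not ptrs:
--         return [], []
--     regions = sorted(zip(ptrs, sizes), key=lambda x: x[0])
--     groups = []
--     for ptr, size in regions:
--         if groups and ptr == groups[-1][-1][0] + groups[-1][-1][1]:
--             groups[-1].append((ptr, size))
--         else:
--             groups.append([(ptr, size)])
--     return [g[0][0] for g in groups], [sum(s for _, s in g) for g in groups]
-- ===== Notes on version B (the rewrite author's own statement) =====
-- stated objective: alternative
-- what changed: Replaces the carry-and-flush accumulator (current_ptr/current_size mutated across the loop) with a partition-then-reduce shape: the sorted regions are first grouped into maximal contiguous runs, then each run is reduced to its first pointer and the sum of its sizes.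
import Mathlib
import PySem

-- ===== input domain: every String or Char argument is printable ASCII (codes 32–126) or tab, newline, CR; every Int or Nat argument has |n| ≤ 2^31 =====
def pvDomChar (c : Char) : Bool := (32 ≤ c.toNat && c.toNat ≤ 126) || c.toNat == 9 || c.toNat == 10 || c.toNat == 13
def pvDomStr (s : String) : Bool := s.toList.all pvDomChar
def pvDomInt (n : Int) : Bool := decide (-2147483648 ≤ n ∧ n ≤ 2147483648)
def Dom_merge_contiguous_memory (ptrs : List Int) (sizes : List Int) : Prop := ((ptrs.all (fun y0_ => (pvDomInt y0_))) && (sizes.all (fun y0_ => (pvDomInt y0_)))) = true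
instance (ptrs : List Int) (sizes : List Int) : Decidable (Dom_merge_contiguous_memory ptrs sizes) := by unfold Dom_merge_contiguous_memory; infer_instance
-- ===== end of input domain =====

-- B replaces A's carry-and-flush accumulator with partition-into-runs followed by a per-run reduce; same cost, different decomposition.

-- ===== PORT A =====
-- the for-loop of A: state (current_ptr, current_size, merged_ptrs, merged_sizes)
def mergeALoop : List (Int × Int) → Int → Int → List Int → List Int → List Int × List Int
  | [], cp, cs, mp, ms => (mp ++ [cp], ms ++ [cs])
  | (p, s) :: rest, cp, cs, mp, ms =>
      if p = cp + cs then mergeALoop rest cp (cs + s) mp ms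
      else mergeALoop rest p s (mp ++ [cp]) (ms ++ [cs])

def merge_contiguous_memory (ptrs : List Int) (sizes : List Int) : List Int × List Int :=
  if ptrs.length ≠ sizes.length then ([], [])   -- A raises ValueError here; excluded by Pre_
  else if ptrs = [] then ([], [])
  else
    match PySem.List.sorted (ptrs.zip sizes) (fun x => x.1) false with
    | [] => ([], [])
    | (cp, cs) :: rest => mergeALoop rest cp cs [] []

-- ===== PORT B =====
-- groups accumulator, newest group first and each group reversed (transliteration of append-at-end)
def mergeBGroup : List (Int × Int) → List (List (Int × Int)) → List (List (Int × Int))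
  | [], acc => acc
  | (p, s) :: rest, acc =>
      match acc with
      | ((lp, ls) :: g) :: gs =>
          if p = lp + ls then mergeBGroup rest (((p, s) :: (lp, ls) :: g) :: gs)
          else mergeBGroup rest ([(p, s)] :: ((lp, ls) :: g) :: gs)
      | _ => mergeBGroup rest ([(p, s)] :: acc)

def mergeBFinish (acc : List (List (Int × Int))) : List Int × List Int :=
  let groups := (acc.reverse).map List.reverse
  (groups.map (fun g => (g.headD (0, 0)).1),
   groups.map (fun g => (g.map Prod.snd).sum))

def merge_contiguous_memory_alt (ptrs : List Int) (sizes : List Int) : List Int × List Int :=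
  if ptrs.length ≠ sizes.length then ([], [])   -- B raises ValueError here; excluded by Pre_
  else if ptrs = [] then ([], [])
  else
    mergeBFinish (mergeBGroup (PySem.List.sorted (ptrs.zip sizes) (fun x => x.1) false) [])

-- ===== PRECONDITION & SPEC =====
-- A (and B) raise ValueError when the lists have different lengths; exactly those inputs are excluded.
def Pre_merge_contiguous_memory (ptrs : List Int) (sizes : List Int) : Prop := ptrs.length = sizes.length
instance (ptrs : List Int) (sizes : List Int) : Decidable (Pre_merge_contiguous_memory ptrs sizes) := by unfold Pre_merge_contiguous_memory; infer_instance
def pvWitness_merge_contiguous_memory : List Int × List Int := ([0, 10, 30], [10, 20, 10])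

def Spec_merge_contiguous_memory (ptrs : List Int) (sizes : List Int) (out : List Int × List Int) : Prop := out = merge_contiguous_memory_alt ptrs sizes
instance (ptrs : List Int) (sizes : List Int) (out : List Int × List Int) : Decidable (Spec_merge_contiguous_memory ptrs sizes out) := by unfold Spec_merge_contiguous_memory; infer_instance

-- ===== CLAIM =====
def Claim_equal_merge_contiguous_memory : Prop := ∀ (ptrs : List Int) (sizes : List Int), Dom_merge_contiguous_memory ptrs sizes → Pre_merge_contiguous_memory ptrs sizes → Spec_merge_contiguous_memory ptrs sizes (merge_contiguous_memory ptrs sizes)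

-- ===== LEMMAS AND PROOFS =====

-- finishing one more (reversed) group appends its start pointer and size sum
lemma mergeBFinish_cons (cur : List (Int × Int)) (gs : List (List (Int × Int))) :
    mergeBFinish (cur :: gs) =
      ((mergeBFinish gs).1 ++ [(cur.reverse.headD (0, 0)).1],
       (mergeBFinish gs).2 ++ [(cur.reverse.map Prod.snd).sum]) := by
  simp [mergeBFinish]

-- headD over ++ with nonempty left list
lemma headD_append_left {α : Type} (l r : List α) (d : α) (h : l ≠ []) :
    (l ++ r).headD d = l.headD d := by
  cases l <;> simp_all

-- loop invariant: A's carried state (start pointer, size sum) describes B's current (reversed) group,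
-- whose end address is lp + ls (its most recent region's end)
lemma mergeLoop_eq (rest : List (Int × Int)) :
    ∀ (lp ls : Int) (g : List (Int × Int)) (gs : List (List (Int × Int))),
    (((lp, ls) :: g).reverse.headD (0, 0)).1 + (((lp, ls) :: g).map Prod.snd).sum = lp + ls →
    mergeALoop rest ((((lp, ls) :: g).reverse.headD (0, 0)).1)
        ((((lp, ls) :: g).map Prod.snd).sum)
        (mergeBFinish gs).1 (mergeBFinish gs).2 =
      mergeBFinish (mergeBGroup rest (((lp, ls) :: g) :: gs)) := by
  induction rest with
  | nil =>
    intro lp ls g gs hinv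
    simp [mergeALoop, mergeBGroup, mergeBFinish_cons]
    ring
  | cons hd tl ih =>
    intro lp ls g gs hinv
    obtain ⟨p, s⟩ := hd
    by_cases hc : p = lp + ls
    · have hc' : p = (((lp, ls) :: g).reverse.headD (0, 0)).1 + (((lp, ls) :: g).map Prod.snd).sum := by
        rw [hinv]; exact hc
      have hstart : (((p, s) :: (lp, ls) :: g).reverse.headD (0, 0)).1
          = (((lp, ls) :: g).reverse.headD (0, 0)).1 := by
        rw [List.reverse_cons, headD_append_left _ _ _ (by simp)]
      have hinv' : (((p, s) :: (lp, ls) :: g).reverse.headD (0, 0)).1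
          + (((p, s) :: (lp, ls) :: g).map Prod.snd).sum = p + s := by
        rw [hstart]
        simp only [List.map_cons, List.sum_cons] at hc' ⊢
        rw [hc']; ring
      have hkey := ih p s ((lp, ls) :: g) gs hinv'
      rw [hstart] at hkey
      simp only [List.map_cons, List.sum_cons] at hkey hc' ⊢
      simp only [mergeALoop, mergeBGroup, if_pos hc]
      rw [if_pos hc']
      rw [show ls + (List.map Prod.snd g).sum + s = s + (ls + (List.map Prod.snd g).sum) from by ring]
      exact hkey
    · have hc' : ¬ p = (((lp, ls) :: g).reverse.headD (0, 0)).1 + (((lp, ls) :: g).map Prod.snd).sum := by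
        rw [hinv]; exact hc
      have hkey := ih p s [] (((lp, ls) :: g) :: gs) (by simp)
      simp only [List.reverse_cons, List.reverse_nil, List.nil_append, List.headD, List.map_cons,
        List.map_nil, List.sum_cons, List.sum_nil, add_zero] at hkey
      have hfin1 : (mergeBFinish (((lp, ls) :: g) :: gs)).1
          = (mergeBFinish gs).1 ++ [(((lp, ls) :: g).reverse.headD (0, 0)).1] := by
        rw [mergeBFinish_cons]
      have hfin2 : (mergeBFinish (((lp, ls) :: g) :: gs)).2
          = (mergeBFinish gs).2 ++ [(((lp, ls) :: g).map Prod.snd).sum] := by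
        rw [mergeBFinish_cons]
        simp [List.map_reverse]
        ring
      rw [hfin1, hfin2] at hkey
      simp only [mergeALoop, mergeBGroup, if_neg hc, if_neg hc']
      exact hkey

theorem merge_contiguous_memory_spec : Claim_equal_merge_contiguous_memory := by
  intro ptrs sizes _ hpre
  have hlen : ptrs.length = sizes.length := hpre
  unfold Spec_merge_contiguous_memory merge_contiguous_memory merge_contiguous_memory_alt
  have hnn : ¬ ptrs.length ≠ sizes.length := fun h => h hlen
  simp only [if_neg hnn]
  by_cases hp : ptrs = []
  · subst hp
    have hz : sizes = [] := List.eq_nil_of_length_eq_zero (by simpa using hlen.symm)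
    subst hz
    rfl
  · simp only [if_neg hp]
    have hne : PySem.List.sorted (ptrs.zip sizes) (fun x => x.1) false ≠ [] := by
      intro h
      have hperm := PySem.List.sorted_perm (ptrs.zip sizes) (fun x : Int × Int => x.1) false
      rw [h] at hperm
      have hz := hperm.length_eq
      simp [List.length_zip, ← hlen] at hz
      exact hp (List.eq_nil_of_length_eq_zero (by omega))
    obtain ⟨⟨cp, cs⟩, rest, hs⟩ := List.exists_cons_of_ne_nil hne
    rw [hs]
    have hkey := mergeLoop_eq rest cp cs [] [] (by simp)
    simp only [List.reverse_cons, List.reverse_nil, List.nil_append, List.headD, List.map_cons,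
      List.map_nil, List.sum_cons, List.sum_nil, add_zero] at hkey
    have hB : mergeBGroup ((cp, cs) :: rest) [] = mergeBGroup rest [[(cp, cs)]] := rfl
    rw [hB]
    rw [show (mergeBFinish []).1 = ([] : List Int) from rfl,
        show (mergeBFinish []).2 = ([] : List Int) from rfl] at hkey
    exact hkey
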